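-- pv_equiv track=rewrite | github.com/g1tsys/coding | Day 3 - Score 100/41-find_same_time.py | process
-- ===== SOURCE A (Python) =====
-- def get_sum(arr, start, end):
--     sum_val = 0
--     for i in range(start, end + 1):
--         sum_val += arr[i]
--     return sum_val
--
-- def process(arr, minAverageLost):
--     size = len(arr)  # 数组长度
--     maxLen = 0  # 最大长度
--     ans = []  # 存储结果的列表
--     ansSize = 0  # 结果的长度
--
--     for start in range(size):  # 遍历数组，起始索引从0到size-1
--         for end in range(start, size):  # 遍历数组，结束索引从start到size-1
--             sum_val = get_sum(arr, start, end)  # 计算子数组的和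
--             currLen = end - start + 1  # 计算子数组的长度
--
--             if sum_val <= minAverageLost * currLen:
--                 # 如果子数组的和小于等于minAverageLost乘以子数组长度
--                 tmp = f"{start}-{end}"  # 格式化起始索引和结束索引
--                 if maxLen == currLen:  # 如果当前子数组长度等于最大长度
--                     ans.append(tmp)  # 将子数组的起始索引和结束索引添加到结果列表中
--                     ansSize += 1  # 结果长度加1
--                 elif currLen > maxLen:  # 如果当前子数组长度大于最大长度
--                     maxLen = currLen  # 更新最大长度
--                     ans = [tmp]  # 更新结果列表为只包含当前子数组的起始索引和结束索引
--                     ansSize = 1  # 结果长度为1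
--
--     if ansSize == 0:  # 如果结果长度为0
--         return "NULL"
--
--     result = ' '.join(ans)  # 将结果列表中的起始索引和结束索引连接成字符串
--     return result
-- ===== SOURCE B (Python) =====
-- def process(arr, minAverageLost):
--     n = len(arr)
--     prefix = [0]
--     for x in arr:
--         prefix.append(prefix[-1] + x)
--     for length in range(n, 0, -1):
--         hits = []
--         for s in range(n - length + 1):
--             if prefix[s + length] - prefix[s] <= minAverageLost * length:
--                 hits.append(f"{s}-{s + length - 1}")
--         if hits:
--             return ' '.join(hits)
--     return "NULL"
-- ===== Notes on version B (the rewrite author's own statement) =====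
-- stated objective: faster
-- what changed: Replaces the O(n^3) triple scan (recomputing each subarray sum) by a prefix-sum table plus a length-descending window scan that returns at the first (= longest) length with a qualifying window, making each subarray test O(1) and skipping all shorter lengths.
import Mathlib
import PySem

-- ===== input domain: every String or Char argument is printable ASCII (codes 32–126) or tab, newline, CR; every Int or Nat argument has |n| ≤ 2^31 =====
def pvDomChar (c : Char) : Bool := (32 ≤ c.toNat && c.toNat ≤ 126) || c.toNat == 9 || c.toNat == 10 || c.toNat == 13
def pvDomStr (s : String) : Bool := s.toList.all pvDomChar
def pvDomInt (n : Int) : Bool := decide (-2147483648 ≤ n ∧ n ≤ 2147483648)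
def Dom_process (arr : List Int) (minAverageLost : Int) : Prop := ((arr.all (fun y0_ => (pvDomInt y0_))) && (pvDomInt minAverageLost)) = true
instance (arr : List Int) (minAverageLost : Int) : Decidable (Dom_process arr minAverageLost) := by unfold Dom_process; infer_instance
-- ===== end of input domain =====

-- B replaces A's O(n^3) sum-recomputing triple scan by prefix sums and a
-- length-descending window scan that stops at the first (longest) qualifying length.


-- ===== PORT A =====
-- get_sum: arr[i] is ported with pyGetD (default 0); process only calls it with
-- 0 ≤ start ≤ i ≤ end < len(arr), where pyGetD is exactly Python's arr[i].
def get_sum (arr : List Int) (start : Int) (end_ : Int) : Int :=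
  (PySem.List.pyRange start (end_ + 1) 1).foldl
    (fun sum_val i => sum_val + PySem.List.pyGetD arr i 0) 0

def process (arr : List Int) (minAverageLost : Int) : String :=
  let size : Int := arr.length
  let st : Int × List String × Int :=
    (PySem.List.pyRange 0 size 1).foldl (fun acc start =>
      (PySem.List.pyRange start size 1).foldl (fun acc end_ =>
        let sum_val := get_sum arr start end_
        let currLen := end_ - start + 1
        if sum_val ≤ minAverageLost * currLen then
          let tmp := PySem.Int.toStr start ++ "-" ++ PySem.Int.toStr end_
          if acc.1 = currLen then (acc.1, acc.2.1 ++ [tmp], acc.2.2 + 1)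
          else if currLen > acc.1 then (currLen, [tmp], 1)
          else acc
        else acc) acc) (0, ([], 0))
  if st.2.2 = 0 then "NULL" else PySem.Str.join " " st.2.1

-- ===== PORT B =====
-- B-side helpers (transliterations of Source B's inner loops)
def altHits (pfx : List Int) (minAverageLost : Int) (n L : Int) : List String :=
  (PySem.List.pyRange 0 (n - L + 1) 1).foldl (fun hits s =>
    if PySem.List.pyGetD pfx (s + L) 0 - PySem.List.pyGetD pfx s 0 ≤ minAverageLost * L then
      hits ++ [PySem.Int.toStr s ++ "-" ++ PySem.Int.toStr (s + L - 1)]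
    else hits) []

def altLoop (pfx : List Int) (minAverageLost : Int) (n : Int) : List Int → String
  | [] => "NULL"
  | L :: rest =>
    let hits := altHits pfx minAverageLost n L
    if hits.isEmpty then altLoop pfx minAverageLost n rest
    else PySem.Str.join " " hits

def process_alt (arr : List Int) (minAverageLost : Int) : String :=
  let n : Int := arr.length
  let pfx := arr.foldl (fun p x => p ++ [PySem.List.pyGetD p (-1) 0 + x]) [0]
  altLoop pfx minAverageLost n (PySem.List.pyRange n 0 (-1))

-- ===== PRECONDITION & SPEC =====
def Spec_process (arr : List Int) (minAverageLost : Int) (out : String) : Prop := out = process_alt arr minAverageLost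
instance (arr : List Int) (minAverageLost : Int) (out : String) : Decidable (Spec_process arr minAverageLost out) := by unfold Spec_process; infer_instance

-- ===== CLAIM (what is proved, stated in full; the proofs are below) =====
def Claim_equal_process : Prop := ∀ (arr : List Int) (minAverageLost : Int), Dom_process arr minAverageLost → Spec_process arr minAverageLost (process arr minAverageLost)

-- ===== LEMMAS AND PROOFS =====

-- Canonical quantities (proof-side only)
def pvPS (arr : List Int) (k : ℕ) : Int := (arr.take k).sum
def pvOk (arr : List Int) (m : Int) (s L : ℕ) : Bool :=
  decide (pvPS arr (s + L) - pvPS arr s ≤ m * (L : Int))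
def pvFmt (s e : Int) : String := PySem.Int.toStr s ++ "-" ++ PySem.Int.toStr e
-- qualifying windows of length L, in order of start
def pvHits (arr : List Int) (m : Int) (L : ℕ) : List String :=
  ((List.range (arr.length - L + 1)).filter (fun s => pvOk arr m s L)).map
    (fun s : ℕ => pvFmt (s : Int) ((s + L - 1 : ℕ) : Int))


-- pairs (start, end) in A's processing order, and A's loop state characterisation
def pvLen (p : ℕ × ℕ) : ℕ := p.2 - p.1 + 1
def pvPairs (n : ℕ) : List (ℕ × ℕ) :=
  (List.range n).flatMap (fun s => (List.range (n - s)).map (fun j => (s, s + j)))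
def pvStep (arr : List Int) (m : Int) (acc : Int × List String × Int) (p : ℕ × ℕ) :
    Int × List String × Int :=
  if pvOk arr m p.1 (pvLen p) then
    let tmp := pvFmt p.1 p.2
    if acc.1 = (pvLen p : Int) then (acc.1, acc.2.1 ++ [tmp], acc.2.2 + 1)
    else if (pvLen p : Int) > acc.1 then ((pvLen p : Int), [tmp], 1)
    else acc
  else acc
def pvQ (arr : List Int) (m : Int) (ps : List (ℕ × ℕ)) : List (ℕ × ℕ) :=
  ps.filter (fun p => pvOk arr m p.1 (pvLen p))
def pvM (arr : List Int) (m : Int) (ps : List (ℕ × ℕ)) : ℕ :=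
  (pvQ arr m ps).foldl (fun a p => max a (pvLen p)) 0
def pvAns (arr : List Int) (m : Int) (ps : List (ℕ × ℕ)) : List String :=
  ((pvQ arr m ps).filter (fun p => pvLen p = pvM arr m ps)).map (fun p => pvFmt p.1 p.2)

-- generic list helpers
lemma pv_foldl_flatMap {α β γ : Type} (l : List α) (f : α → List β) (g : γ → β → γ) (i : γ) :
    (l.flatMap f).foldl g i = l.foldl (fun a x => (f x).foldl g a) i := by
  induction l generalizing i with
  | nil => rfl
  | cons x xs ih => simp [List.flatMap_cons, List.foldl_append, ih]

lemma pv_flatMap_if {α β : Type} (l : List α) (p : α → Bool) (f : α → β) :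
    (l.flatMap (fun s => if p s then [f s] else [])) = (l.filter p).map f := by
  induction l with
  | nil => rfl
  | cons x xs ih => by_cases h : p x <;> simp [List.flatMap_cons, h, ih]

lemma pv_le_foldl_max {α : Type} (g : α → ℕ) (l : List α) (init : ℕ) :
    (init ≤ l.foldl (fun a p => max a (g p)) init) ∧
      (∀ x ∈ l, g x ≤ l.foldl (fun a p => max a (g p)) init) := by
  induction l generalizing init with
  | nil => simp
  | cons y ys ih =>
    refine ⟨le_trans (le_max_left _ _) (ih (max init (g y))).1, ?_⟩
    intro x hx
    rcases List.mem_cons.mp hx with h | h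
    · subst h; exact le_trans (le_max_right _ _) (ih (max init (g x))).1
    · exact (ih (max init (g y))).2 x h

lemma pv_foldl_max_eq {α : Type} (g : α → ℕ) (l : List α) (init : ℕ) :
    l.foldl (fun a p => max a (g p)) init = init ∨
      ∃ p ∈ l, l.foldl (fun a p => max a (g p)) init = g p := by
  induction l generalizing init with
  | nil => left; rfl
  | cons y ys ih =>
    rcases ih (max init (g y)) with h | ⟨p, hp, he⟩
    · rcases Nat.le_total init (g y) with hle | hle
      · right
        refine ⟨y, List.mem_cons_self, ?_⟩
        rw [Nat.max_eq_right hle] at h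
        simpa [List.foldl_cons, Nat.max_eq_right hle] using h
      · left
        rw [Nat.max_eq_left hle] at h
        simpa [List.foldl_cons, Nat.max_eq_left hle] using h
    · right; exact ⟨p, List.mem_cons_of_mem _ hp, by simp [List.foldl_cons, he]⟩

lemma pv_filter_eq_range (k a : ℕ) :
    (List.range k).filter (fun j => j = a) = if a < k then [a] else [] := by
  induction k with
  | zero => simp
  | succ k ih =>
    rw [List.range_succ, List.filter_append, ih]
    by_cases h : a < k
    · have hk : k ≠ a := by omega
      simp [h, Nat.lt_succ_of_lt h, hk]
    · by_cases h2 : a = k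
      · subst h2; simp [h, List.filter_cons]
      · have hk : ¬ a < k + 1 := by omega
        have hk2 : k ≠ a := fun e => h2 e.symm
        simp [h, hk, hk2, List.filter_cons]

lemma pv_mem_pairs (n : ℕ) (p : ℕ × ℕ) :
    p ∈ pvPairs n ↔ p.1 ≤ p.2 ∧ p.2 < n := by
  simp only [pvPairs, List.mem_flatMap, List.mem_map, List.mem_range]
  constructor
  · rintro ⟨s, hs, j, hj, rfl⟩
    constructor <;> simp <;> omega
  · rintro ⟨h1, h2⟩
    exact ⟨p.1, by omega, p.2 - p.1, by omega, by ext <;> simp <;> omega⟩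

-- B side: the prefix list
lemma pv_prefix_eq (arr : List Int) :
    arr.foldl (fun p x => p ++ [PySem.List.pyGetD p (-1) 0 + x]) [0] =
      (List.range (arr.length + 1)).map (pvPS arr) := by
  induction arr using List.reverseRecOn with
  | nil => simp [pvPS]
  | append_singleton ys x ih =>
    rw [List.foldl_append, List.foldl_cons, List.foldl_nil, ih]
    have hne : (List.range (ys.length + 1)).map (pvPS ys) ≠ [] := by simp
    rw [PySem.List.pyGetD_neg_one _ _ hne]
    have hlast : ((List.range (ys.length + 1)).map (pvPS ys)).getLast hne = pvPS ys ys.length := by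
      rw [List.getLast_eq_getElem]
      simp
    rw [hlast]
    have hlen : (ys ++ [x]).length + 1 = (ys.length + 1) + 1 := by simp
    rw [hlen]
    conv_rhs => rw [List.range_succ, List.map_append, List.map_singleton]
    congr 1
    · apply List.map_congr_left
      intro k hk
      simp only [List.mem_range] at hk
      simp [pvPS, List.take_append_of_le_length (by omega : k ≤ ys.length)]
    · have h1 : pvPS ys ys.length = ys.sum := by simp [pvPS]
      have h2 : pvPS (ys ++ [x]) (ys.length + 1) = ys.sum + x := by
        simp [pvPS, List.take_of_length_le (by simp : (ys ++ [x]).length ≤ ys.length + 1)]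
      rw [h1, h2]

lemma pv_pfx_get (arr : List Int) (k : ℕ) (hk : k ≤ arr.length) :
    PySem.List.pyGetD ((List.range (arr.length + 1)).map (pvPS arr)) (k : Int) 0 = pvPS arr k := by
  rw [PySem.List.pyGetD_natCast]
  rw [List.getD_eq_getElem?_getD, List.getElem?_map, List.getElem?_range (by omega : k < arr.length + 1)]
  rfl

lemma pv_altHits_eq (arr : List Int) (m : Int) (L : ℕ) (h1 : 1 ≤ L) (h2 : L ≤ arr.length) :
    altHits ((List.range (arr.length + 1)).map (pvPS arr)) m (arr.length : Int) (L : Int) =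
      pvHits arr m L := by
  unfold altHits
  have hcast : (arr.length : Int) - L + 1 = ((arr.length - L + 1 : ℕ) : Int) := by omega
  rw [hcast, PySem.List.pyRange_zero_natCast, List.foldl_map]
  rw [PySem.List.foldl_congr_mem _ _ (fun (hits : List String) (s : ℕ) =>
      if pvOk arr m s L then hits ++ [pvFmt (s : Int) ((s + L - 1 : ℕ) : Int)] else hits) _ ?_]
  · rw [PySem.List.foldl_append_if]
    rfl
  · intro acc s hs
    simp only [List.mem_range] at hs
    have h1 : (s : Int) + (L : Int) = ((s + L : ℕ) : Int) := by push_cast; ring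
    have h2 : ((s + L : ℕ) : Int) - 1 = ((s + L - 1 : ℕ) : Int) := by omega
    rw [h1, h2, pv_pfx_get arr (s + L) (by omega), pv_pfx_get arr s (by omega)]
    simp [pvOk, pvFmt]

-- B side: the length-descending loop
lemma pv_altLoop_null (pfx : List Int) (m n : Int) (a : ℕ)
    (H : ∀ L : ℕ, 1 ≤ L → L ≤ a → altHits pfx m n (L : Int) = []) :
    altLoop pfx m n (PySem.List.pyRange (a : Int) 0 (-1)) = "NULL" := by
  induction a with
  | zero => rw [PySem.List.pyRange_neg_one_eq_nil (by norm_num)]; rfl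
  | succ a ih =>
    rw [PySem.List.pyRange_neg_one_cons (by exact_mod_cast Nat.succ_pos a)]
    have hx : ((a + 1 : ℕ) : Int) - 1 = (a : ℕ) := by push_cast; ring
    rw [hx]
    simp only [altLoop, H (a + 1) (by omega) le_rfl, List.isEmpty_nil, if_true]
    exact ih (fun L hL1 hL2 => H L hL1 (by omega))

lemma pv_altLoop_hit (pfx : List Int) (m n : Int) (M : ℕ) (hM : 1 ≤ M) (a : ℕ) (hMa : M ≤ a)
    (Hempty : ∀ L : ℕ, M < L → L ≤ a → altHits pfx m n (L : Int) = [])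
    (Hne : altHits pfx m n (M : Int) ≠ []) :
    altLoop pfx m n (PySem.List.pyRange (a : Int) 0 (-1)) =
      PySem.Str.join " " (altHits pfx m n (M : Int)) := by
  induction a with
  | zero => omega
  | succ a ih =>
    rw [PySem.List.pyRange_neg_one_cons (by exact_mod_cast Nat.succ_pos a)]
    have hx : ((a + 1 : ℕ) : Int) - 1 = (a : ℕ) := by push_cast; ring
    rw [hx]
    by_cases hMe : M = a + 1
    · subst hMe
      simp only [altLoop]
      have hfalse : (altHits pfx m n ((a + 1 : ℕ) : Int)).isEmpty = false := by
        cases he : altHits pfx m n ((a + 1 : ℕ) : Int) with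
        | nil => exact absurd he Hne
        | cons y ys => rfl
      rw [hfalse]
      simp
    · have hMa' : M ≤ a := by omega
      simp only [altLoop, Hempty (a + 1) (by omega) le_rfl, List.isEmpty_nil, if_true]
      exact ih hMa' (fun L hL1 hL2 => Hempty L hL1 (by omega))

-- A side: get_sum via prefix sums
lemma pv_sumRange (arr : List Int) (s L : ℕ) (h : s + L ≤ arr.length) :
    (PySem.List.pyRange (s : Int) ((s : Int) + (L : Int)) 1).foldl
        (fun a i => a + PySem.List.pyGetD arr i 0) 0 =
      pvPS arr (s + L) - pvPS arr s := by
  induction L with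
  | zero =>
    rw [show (s : Int) + ((0 : ℕ) : Int) = (s : Int) by simp,
      PySem.List.pyRange_one_eq_nil le_rfl]
    simp
  | succ L ih =>
    have hc : (s : Int) + ((L + 1 : ℕ) : Int) = ((s : Int) + (L : ℕ)) + 1 := by push_cast; ring
    rw [hc, PySem.List.pyRange_one_succ_right (by omega), List.foldl_append,
      ih (by omega), List.foldl_cons, List.foldl_nil]
    have hg : PySem.List.pyGetD arr ((s : Int) + (L : ℕ)) 0 = arr.getD (s + L) 0 := by
      rw [show (s : Int) + (L : ℕ) = ((s + L : ℕ) : Int) by push_cast; ring,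
        PySem.List.pyGetD_natCast]
    have hlt : s + L < arr.length := by omega
    have hps : pvPS arr (s + L + 1) = pvPS arr (s + L) + arr.getD (s + L) 0 := by
      simp only [pvPS, List.take_add_one, List.sum_append, List.getElem?_eq_getElem hlt,
        List.getD_eq_getElem?_getD, Option.toList_some, List.sum_cons, List.sum_nil,
        Option.getD_some, add_zero]
    rw [hg, show s + (L + 1) = s + L + 1 from rfl, hps]
    ring

-- A side: the nested loops fold pvStep over pvPairs
lemma pv_fold_eq (arr : List Int) (m : Int) :
    (PySem.List.pyRange 0 (arr.length : Int) 1).foldl (fun acc start =>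
      (PySem.List.pyRange start (arr.length : Int) 1).foldl (fun acc end_ =>
        let sum_val := get_sum arr start end_
        let currLen := end_ - start + 1
        if sum_val ≤ m * currLen then
          let tmp := PySem.Int.toStr start ++ "-" ++ PySem.Int.toStr end_
          if acc.1 = currLen then (acc.1, acc.2.1 ++ [tmp], acc.2.2 + 1)
          else if currLen > acc.1 then (currLen, [tmp], 1)
          else acc
        else acc) acc) ((0 : Int), (([] : List String), (0 : Int))) =
      (pvPairs arr.length).foldl (pvStep arr m) (0, ([], 0)) := by
  rw [PySem.List.pyRange_zero_natCast, List.foldl_map, pvPairs, pv_foldl_flatMap]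
  apply PySem.List.foldl_congr_mem
  intro acc s hs
  simp only [List.mem_range] at hs
  rw [List.foldl_map]
  have hr : PySem.List.pyRange (s : Int) (arr.length : Int) 1 =
      (List.range (arr.length - s)).map (fun k : ℕ => (s : Int) + k) := by
    rw [PySem.List.pyRange_one]
    have : ((arr.length : Int) - s).toNat = arr.length - s := by omega
    rw [this]
  rw [hr, List.foldl_map]
  apply PySem.List.foldl_congr_mem
  intro acc2 j hj
  simp only [List.mem_range] at hj
  have hlen : pvLen (s, s + j) = j + 1 := by simp [pvLen]
  have hcast : (s : Int) + (j : Int) - (s : Int) + 1 = ((j + 1 : ℕ) : Int) := by push_cast; ring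
  have hg : get_sum arr (s : Int) ((s : Int) + (j : Int)) = pvPS arr (s + (j + 1)) - pvPS arr s := by
    have hc2 : (s : Int) + (j : Int) + 1 = (s : Int) + ((j + 1 : ℕ) : Int) := by push_cast; ring
    unfold get_sum
    rw [hc2, pv_sumRange arr s (j + 1) (by omega)]
  have hfmt : (s : Int) + (j : Int) = ((s + j : ℕ) : Int) := by push_cast; ring
  simp only [pvStep, hlen, pvFmt, pvOk, decide_eq_true_eq]
  rw [hg, hcast, hfmt]

-- A side: loop-state invariant
lemma pv_inv (arr : List Int) (m : Int) (ps : List (ℕ × ℕ)) :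
    ps.foldl (pvStep arr m) (0, ([], 0)) =
      ((pvM arr m ps : Int), (pvAns arr m ps, ((pvAns arr m ps).length : Int))) := by
  induction ps using List.reverseRecOn with
  | nil => simp [pvQ, pvM, pvAns]
  | append_singleton ps p ih =>
    rw [List.foldl_append, List.foldl_cons, List.foldl_nil, ih]
    by_cases hok : pvOk arr m p.1 (pvLen p)
    · have hq : pvQ arr m (ps ++ [p]) = pvQ arr m ps ++ [p] := by
        simp [pvQ, List.filter_append, List.filter_cons, hok]
      have hM : pvM arr m (ps ++ [p]) = max (pvM arr m ps) (pvLen p) := by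
        simp [pvM, hq, List.foldl_append]
      rcases lt_trichotomy (pvLen p) (pvM arr m ps) with hlt | heq | hgt
      · have h1 : ¬ ((pvM arr m ps : Int) = (pvLen p : Int)) := by
          intro h; exact absurd (by exact_mod_cast h) (by omega)
        have h2 : ¬ ((pvLen p : Int) > (pvM arr m ps : Int)) := by
          intro h; exact absurd (by exact_mod_cast h) (by omega)
        have hM' : pvM arr m (ps ++ [p]) = pvM arr m ps := by rw [hM]; omega
        have hAns : pvAns arr m (ps ++ [p]) = pvAns arr m ps := by
          have hpne : ¬ (pvLen p = pvM arr m ps) := by omega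
          unfold pvAns
          rw [hq, hM', List.filter_append]
          simp [List.filter_cons, hpne]
        simp [pvStep, hok, h1, h2, hM', hAns]
      · have h1 : (pvM arr m ps : Int) = (pvLen p : Int) := by exact_mod_cast heq.symm
        have hM' : pvM arr m (ps ++ [p]) = pvM arr m ps := by rw [hM]; omega
        have hAns : pvAns arr m (ps ++ [p]) = pvAns arr m ps ++ [pvFmt p.1 p.2] := by
          unfold pvAns
          rw [hq, hM', List.filter_append]
          simp [List.filter_cons, heq]
        simp [pvStep, hok, h1, hM', hAns]
      · have h1 : ¬ ((pvM arr m ps : Int) = (pvLen p : Int)) := by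
          intro h; exact absurd (by exact_mod_cast h) (by omega)
        have h2 : (pvLen p : Int) > (pvM arr m ps : Int) := by exact_mod_cast hgt
        have hM' : pvM arr m (ps ++ [p]) = pvLen p := by rw [hM]; omega
        have hAns : pvAns arr m (ps ++ [p]) = [pvFmt p.1 p.2] := by
          have hnil : (pvQ arr m ps).filter (fun q => pvLen q = pvM arr m (ps ++ [p])) = [] := by
            rw [List.filter_eq_nil_iff]
            intro q hqmem
            have hle : pvLen q ≤ pvM arr m ps := (pv_le_foldl_max pvLen (pvQ arr m ps) 0).2 q hqmem
            rw [hM']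
            simp only [decide_eq_true_eq]
            omega
          unfold pvAns
          rw [hq, List.filter_append, hnil]
          simp [List.filter_cons, hM']
        simp [pvStep, hok, h1, h2, hM', hAns]
    · have hq : pvQ arr m (ps ++ [p]) = pvQ arr m ps := by
        unfold pvQ
        rw [List.filter_append]
        simp [hok]
      have hM' : pvM arr m (ps ++ [p]) = pvM arr m ps := by
        unfold pvM
        rw [hq]
      have hAns : pvAns arr m (ps ++ [p]) = pvAns arr m ps := by
        unfold pvAns
        rw [hq, hM']
      simp [pvStep, hok, hM', hAns]

-- the answer list at the maximal length equals B's window scan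
lemma pv_M_attain (arr : List Int) (m : Int) (ps : List (ℕ × ℕ)) (h : pvQ arr m ps ≠ []) :
    ∃ p ∈ pvQ arr m ps, pvLen p = pvM arr m ps := by
  rcases pv_foldl_max_eq pvLen (pvQ arr m ps) 0 with h0 | ⟨p, hp, he⟩
  · exfalso
    cases hq : pvQ arr m ps with
    | nil => exact h hq
    | cons q qs =>
      have hmem : q ∈ pvQ arr m ps := by rw [hq]; exact List.mem_cons_self
      have hle : pvLen q ≤ pvM arr m ps := (pv_le_foldl_max pvLen (pvQ arr m ps) 0).2 q hmem
      have hM0 : pvM arr m ps = 0 := h0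
      have h1 : 1 ≤ pvLen q := by simp [pvLen]
      omega
  · exact ⟨p, hp, (show pvM arr m ps = pvLen p from he).symm⟩

lemma pv_M_bounds (arr : List Int) (m : Int) (h : pvQ arr m (pvPairs arr.length) ≠ []) :
    1 ≤ pvM arr m (pvPairs arr.length) ∧ pvM arr m (pvPairs arr.length) ≤ arr.length := by
  obtain ⟨p, hp, hlen⟩ := pv_M_attain arr m _ h
  have hpp := (pv_mem_pairs arr.length p).mp (List.mem_filter.mp hp).1
  have : pvLen p = p.2 - p.1 + 1 := rfl
  omega

lemma pv_range_filter (n k : ℕ) (hk : k ≤ n) (q : ℕ → Bool) :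
    (List.range n).filter (fun s => decide (s < k) && q s) = (List.range k).filter q := by
  induction n with
  | zero =>
    have h0 : k = 0 := by omega
    subst h0
    rfl
  | succ n ih =>
    by_cases h : k = n + 1
    · subst h
      apply List.filter_congr
      intro s hs
      simp only [List.mem_range] at hs
      simp [hs]
    · have hk' : k ≤ n := by omega
      rw [List.range_succ, List.filter_append, ih hk']
      have hnk : ¬ (n < k) := by omega
      simp [hnk]

lemma pv_inner (arr : List Int) (m : Int) (n s M : ℕ) (hM : 1 ≤ M) :
    (((List.range (n - s)).map (fun j => (s, s + j))).filter
        (fun p => decide (pvLen p = M) && pvOk arr m p.1 (pvLen p))).map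
      (fun p : ℕ × ℕ => pvFmt p.1 p.2)
    = if (decide (M - 1 < n - s) && pvOk arr m s M) then
        [pvFmt (s : Int) ((s + M - 1 : ℕ) : Int)] else [] := by
  rw [List.filter_map, List.map_map]
  have hfun : ((fun p => decide (pvLen p = M) && pvOk arr m p.1 (pvLen p)) ∘
      (fun j : ℕ => (s, s + j))) = fun j => decide (j = M - 1) && pvOk arr m s M := by
    funext j
    simp only [Function.comp_apply]
    by_cases hj : j = M - 1
    · subst hj
      have h1 : pvLen (s, s + (M - 1)) = M := by simp only [pvLen]; omega
      rw [h1]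
      simp
    · have h1 : ¬ (pvLen (s, s + j) = M) := by simp only [pvLen]; omega
      simp [h1, hj]
  rw [hfun]
  by_cases hok : pvOk arr m s M
  · have hfun2 : (fun j : ℕ => decide (j = M - 1) && pvOk arr m s M) =
        fun j : ℕ => decide (j = M - 1) := by
      funext j
      rw [hok]
      simp
    rw [hfun2, pv_filter_eq_range]
    by_cases hlt : M - 1 < n - s
    · have hidx : s + (M - 1) = s + M - 1 := by omega
      simp [hlt, hok, pvFmt, hidx]
    · simp [hlt, hok]
  · have hok' : pvOk arr m s M = false := by
      cases hb : pvOk arr m s M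
      · rfl
      · exact absurd hb hok
    simp [hok']

lemma pv_ans_eq_hits (arr : List Int) (m : Int) (hne : pvQ arr m (pvPairs arr.length) ≠ []) :
    pvAns arr m (pvPairs arr.length) = pvHits arr m (pvM arr m (pvPairs arr.length)) := by
  obtain ⟨hM1, hMn⟩ := pv_M_bounds arr m hne
  unfold pvAns pvQ
  rw [List.filter_filter]
  set Mv := pvM arr m (pvPairs arr.length) with hMv
  conv_lhs => rw [pvPairs]
  rw [List.filter_flatMap, List.map_flatMap]
  have hinner : (fun s : ℕ => (((List.range (arr.length - s)).map (fun j => (s, s + j))).filter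
        (fun a => decide (pvLen a = Mv) && pvOk arr m a.1 (pvLen a))).map
        (fun p : ℕ × ℕ => pvFmt p.1 p.2)) =
      fun s : ℕ => if (decide (Mv - 1 < arr.length - s) && pvOk arr m s Mv) then
        [pvFmt (s : Int) ((s + Mv - 1 : ℕ) : Int)] else [] := by
    funext s
    exact pv_inner arr m arr.length s Mv hM1
  rw [hinner, pv_flatMap_if]
  have hcond : (List.range arr.length).filter
      (fun s => decide (Mv - 1 < arr.length - s) && pvOk arr m s Mv) =
      (List.range arr.length).filter
      (fun s => decide (s < arr.length - Mv + 1) && pvOk arr m s Mv) := by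
    apply List.filter_congr
    intro s hs
    simp only [List.mem_range] at hs
    have hpe : decide (Mv - 1 < arr.length - s) = decide (s < arr.length - Mv + 1) :=
      decide_eq_decide.mpr (by omega)
    rw [hpe]
  rw [hcond, pv_range_filter _ _ (by omega)]
  rfl

lemma pv_hits_ne (arr : List Int) (m : Int) (h : pvQ arr m (pvPairs arr.length) ≠ []) :
    pvHits arr m (pvM arr m (pvPairs arr.length)) ≠ [] := by
  obtain ⟨p, hp, hlen⟩ := pv_M_attain arr m _ h
  obtain ⟨hpairs, hok⟩ := List.mem_filter.mp hp
  have hpp := (pv_mem_pairs arr.length p).mp hpairs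
  rw [hlen] at hok
  have h1 : p.1 < arr.length - pvM arr m (pvPairs arr.length) + 1 := by
    have : pvLen p = p.2 - p.1 + 1 := rfl
    omega
  have hmem : p.1 ∈ (List.range (arr.length - pvM arr m (pvPairs arr.length) + 1)).filter
      (fun s => pvOk arr m s (pvM arr m (pvPairs arr.length))) :=
    List.mem_filter.mpr ⟨List.mem_range.mpr h1, hok⟩
  intro hnil
  unfold pvHits at hnil
  rw [List.map_eq_nil_iff] at hnil
  rw [hnil] at hmem
  exact absurd hmem (List.not_mem_nil)

lemma pv_hits_empty_above (arr : List Int) (m : Int) (L : ℕ)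
    (hL : pvM arr m (pvPairs arr.length) < L) (hLn : L ≤ arr.length) :
    pvHits arr m L = [] := by
  unfold pvHits
  rw [List.map_eq_nil_iff, List.filter_eq_nil_iff]
  intro s hs hok
  simp only [List.mem_range] at hs
  have hpair : (s, s + L - 1) ∈ pvPairs arr.length :=
    (pv_mem_pairs arr.length _).mpr ⟨by omega, by omega⟩
  have hplen : pvLen (s, s + L - 1) = L := by
    simp only [pvLen]
    omega
  have hmemQ : (s, s + L - 1) ∈ pvQ arr m (pvPairs arr.length) :=
    List.mem_filter.mpr ⟨hpair, by rw [hplen]; exact hok⟩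
  have hle : pvLen (s, s + L - 1) ≤ pvM arr m (pvPairs arr.length) :=
    (pv_le_foldl_max pvLen (pvQ arr m (pvPairs arr.length)) 0).2 _ hmemQ
  rw [hplen] at hle
  omega

lemma pv_hits_empty_of_none (arr : List Int) (m : Int) (L : ℕ)
    (h : pvQ arr m (pvPairs arr.length) = []) (h1 : 1 ≤ L) (hLn : L ≤ arr.length) :
    pvHits arr m L = [] := by
  unfold pvHits
  rw [List.map_eq_nil_iff, List.filter_eq_nil_iff]
  intro s hs hok
  simp only [List.mem_range] at hs
  have hpair : (s, s + L - 1) ∈ pvPairs arr.length :=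
    (pv_mem_pairs arr.length _).mpr ⟨by omega, by omega⟩
  have hplen : pvLen (s, s + L - 1) = L := by
    simp only [pvLen]
    omega
  have hmemQ : (s, s + L - 1) ∈ pvQ arr m (pvPairs arr.length) :=
    List.mem_filter.mpr ⟨hpair, by rw [hplen]; exact hok⟩
  rw [h] at hmemQ
  exact absurd hmemQ (List.not_mem_nil)

lemma pv_ans_ne (arr : List Int) (m : Int) (h : pvQ arr m (pvPairs arr.length) ≠ []) :
    pvAns arr m (pvPairs arr.length) ≠ [] := by
  obtain ⟨p, hp, hlen⟩ := pv_M_attain arr m _ h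
  intro hnil
  unfold pvAns at hnil
  rw [List.map_eq_nil_iff, List.filter_eq_nil_iff] at hnil
  exact hnil p hp (by simp [hlen])

lemma pv_ans_empty (arr : List Int) (m : Int) (h : pvQ arr m (pvPairs arr.length) = []) :
    pvAns arr m (pvPairs arr.length) = [] := by
  simp [pvAns, h]

-- ===== VERDICT (by name: the statement is the Claim_ definition above) =====
theorem process_spec : Claim_equal_process := by
  unfold Claim_equal_process
  intro arr m _
  unfold Spec_process
  have hfe := pv_fold_eq arr m
  unfold process process_alt
  dsimp only
  dsimp only at hfe
  rw [hfe, pv_inv, pv_prefix_eq]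
  by_cases hq : pvQ arr m (pvPairs arr.length) = []
  · have hans : pvAns arr m (pvPairs arr.length) = [] := pv_ans_empty arr m hq
    rw [hans]
    rw [pv_altLoop_null _ m _ arr.length ?_]
    · simp
    · intro L h1 h2
      rw [pv_altHits_eq arr m L h1 h2]
      exact pv_hits_empty_of_none arr m L hq h1 h2
  · obtain ⟨hM1, hMn⟩ := pv_M_bounds arr m hq
    have hans : pvAns arr m (pvPairs arr.length) ≠ [] := pv_ans_ne arr m hq
    have hlen : ((pvAns arr m (pvPairs arr.length)).length : Int) ≠ 0 := by
      simpa using hans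
    rw [if_neg hlen]
    rw [pv_altLoop_hit _ m _ (pvM arr m (pvPairs arr.length)) hM1 arr.length hMn ?_ ?_]
    · rw [pv_altHits_eq arr m _ hM1 hMn, pv_ans_eq_hits arr m hq]
    · intro L hL1 hL2
      rw [pv_altHits_eq arr m L (by omega) hL2]
      exact pv_hits_empty_above arr m L hL1 hL2
    · rw [pv_altHits_eq arr m _ hM1 hMn]
      exact pv_hits_ne arr m hq
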